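-- pv_equiv track=rewrite | github.com/JGSnyder/nand2tetris | Assembler/code/assembler.py | symbol_parse
-- ===== SOURCE A (Python) =====
-- def symbol_parse(in_text):
--     """
--     List of Strings -> Dict
--     Returns 2x dictionaries of values from parsed list of strings
--     >>> symbol_parse(["(LOOP)", "@i", "M=D", "(STOP)", "@4", "D=A"])
--     {'LOOP': 0, 'STOP': 2}
--     >>> symbol_parse(["@sum", "D=A", "@test", "M=AM", "(LOOP)", "@i", "D=M;JEQ", "@sum", "@i"])
--     {'LOOP': 4}
--     >>> symbol_parse(["@R0", "M;JMP", "(LOOP)", "@i", "M=D", "(STOP)", "@4", "D=A"])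
--     {'LOOP': 2, 'STOP': 4}
--     """
--     symbols = {}
--     lineNumber = 0
--     for line in in_text:
--         if line.startswith("("):
--             symbol = line.strip("()")
--             symbols[symbol] = lineNumber
--         else:
--             lineNumber += 1
--     return symbols
-- ===== SOURCE B (Python) =====
-- def symbol_parse(in_text):
--     """Alternative decomposition: collect labels with their positions first,
--     then build the dict in one comprehension (a label's instruction number is
--     its position minus its rank among the labels)."""
--     labels = [(i, line) for i, line in enumerate(in_text) if line.startswith("(")]
--     return {line.strip("()"): i - k for k, (i, line) in enumerate(labels)}
-- ===== Notes on version B (the rewrite author's own statement) =====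
-- stated objective: alternative
-- what changed: Replaces the single pass threading an incrementing instruction counter with a filter that collects labels with their positions plus a dict comprehension computing each label's instruction number arithmetically as position minus label rank.
import Mathlib
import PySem

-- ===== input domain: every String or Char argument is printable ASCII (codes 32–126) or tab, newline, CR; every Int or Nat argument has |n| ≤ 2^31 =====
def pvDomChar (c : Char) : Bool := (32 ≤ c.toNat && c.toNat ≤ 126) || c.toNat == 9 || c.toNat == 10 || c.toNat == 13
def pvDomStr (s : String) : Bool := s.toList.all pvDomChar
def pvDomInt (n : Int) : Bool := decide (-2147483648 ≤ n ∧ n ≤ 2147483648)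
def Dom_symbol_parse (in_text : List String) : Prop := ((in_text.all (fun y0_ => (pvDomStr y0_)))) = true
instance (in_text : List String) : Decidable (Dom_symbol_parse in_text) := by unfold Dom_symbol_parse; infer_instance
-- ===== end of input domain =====

-- B replaces A's single counter-threading pass by a label-collecting filter plus a dict
-- comprehension computing each label's number as position minus label rank (objective: alternative).

-- ===== PORT A =====
-- one pass: a dict of symbols and an incrementing line counter threaded together
def symbol_parse (in_text : List String) : List (String × Int) :=
  (in_text.foldl
    (fun (st : PySem.Dict String Int × Int) line =>
      if PySem.Str.startswith line "(" then
        (st.1.insert (PySem.Str.stripChars line "()") st.2, st.2)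
      else
        (st.1, st.2 + 1))
    (PySem.Dict.empty, 0)).1.items

-- ===== PORT B =====
-- labels = [(i, line) for i, line in enumerate(in_text) if line.startswith("(")]
-- {line.strip("()"): i - k for k, (i, line) in enumerate(labels)}
def symbol_parse_alt (in_text : List String) : List (String × Int) :=
  let labels := (PySem.List.enumerate in_text).filter (fun p => PySem.Str.startswith p.2 "(")
  ((PySem.List.enumerate labels).foldl
    (fun (d : PySem.Dict String Int) p =>
      d.insert (PySem.Str.stripChars p.2.2 "()") (p.2.1 - p.1))
    PySem.Dict.empty).items

-- ===== PRECONDITION & SPEC =====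
def Spec_symbol_parse (in_text : List String) (out : List (String × Int)) : Prop := out = symbol_parse_alt in_text
instance (in_text : List String) (out : List (String × Int)) : Decidable (Spec_symbol_parse in_text out) := by unfold Spec_symbol_parse; infer_instance

-- ===== CLAIM (what is proved, stated in full; the proofs are below) =====
def Claim_equal_symbol_parse : Prop := ∀ (in_text : List String), Dom_symbol_parse in_text → Spec_symbol_parse in_text (symbol_parse in_text)

-- ===== LEMMAS AND PROOFS =====
-- invariant: A's counter equals (current position s) - (rank k0 of the next label)
lemma symbol_parse_key (l : List String) (d : PySem.Dict String Int) (s k0 : Int) :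
    (l.foldl
      (fun (st : PySem.Dict String Int × Int) line =>
        if PySem.Str.startswith line "(" then
          (st.1.insert (PySem.Str.stripChars line "()") st.2, st.2)
        else
          (st.1, st.2 + 1))
      (d, s - k0)).1 =
    (PySem.List.enumerate ((PySem.List.enumerate l s).filter (fun p => PySem.Str.startswith p.2 "(")) k0).foldl
      (fun (d : PySem.Dict String Int) p =>
        d.insert (PySem.Str.stripChars p.2.2 "()") (p.2.1 - p.1))
      d := by
  induction l generalizing d s k0 with
  | nil => simp [PySem.List.enumerate_nil]
  | cons line rest ih =>
    by_cases h : PySem.Str.startswith line "(" = true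
    · simp only [PySem.List.enumerate_cons, List.filter_cons, h, if_pos, List.foldl_cons]
      have : s - k0 = (s + 1) - (k0 + 1) := by ring
      rw [this, ih]
    · simp only [PySem.List.enumerate_cons, List.filter_cons, h, List.foldl_cons,
        Bool.false_eq_true, if_false]
      have : s - k0 + 1 = (s + 1) - k0 := by ring
      rw [this, ih]

-- ===== VERDICT (by name: the statement is the Claim_ definition above) =====
theorem symbol_parse_spec : Claim_equal_symbol_parse := by
  intro in_text _
  have h := symbol_parse_key in_text PySem.Dict.empty 0 0
  simp only [sub_zero] at h
  simp only [Spec_symbol_parse, symbol_parse, symbol_parse_alt, h]
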